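-- pv_equiv track=rewrite | github.com/bcgov/citz-imb-fsd-DQ | day7-inventory-management/sol.py | tally_repeats
-- ===== SOURCE A (Python) =====
-- def tally_repeats(id_list):
--     two_rep_count = 0
--     three_rep_count = 0
--
--     for cur_id in id_list:
--         if cur_id == "":
--             continue
--         id_chars = {}
--         for char in cur_id:
--             if char == " ":
--                 continue
--             if char not in id_chars.keys():
--                 id_chars[char] = 1
--             else:
--                 id_chars[char] += 1
--
--         found_double = False
--         found_triple = False
--
--         for k_v_pair in id_chars.items():
--             # key = k_v_pair[0]
--             value = k_v_pair[1]
--             if value == 2 and not found_double: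
--                 two_rep_count += 1
--                 found_double = True
--                 continue
--             if value == 3 and not found_triple:
--                 three_rep_count += 1
--                 found_triple = True
--
--     return two_rep_count * three_rep_count
-- ===== SOURCE B (Python) =====
-- def _run_lengths(chars):
--     # chars is sorted, so each run of consecutive equal chars is all
--     # occurrences of that char; return the list of run lengths.
--     if not chars:
--         return []
--     head = chars[0]
--     run = 1
--     while run < len(chars) and chars[run] == head:
--         run += 1
--     return [run] + _run_lengths(chars[run:])
--
--
-- def tally_repeats(id_list):
--     two_count = 0
--     three_count = 0
--     for cur_id in id_list:
--         runs = _run_lengths(sorted(c for c in cur_id if c != " "))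
--         if 2 in runs:
--             two_count += 1
--         if 3 in runs:
--             three_count += 1
--     return two_count * three_count
-- ===== Notes on version B (the rewrite author's own statement) =====
-- stated objective: alternative
-- what changed: Replaces A's per-ID hash-dict character counting plus a flag-guarded scan over dict values with sorting each ID's non-space characters and recursively extracting run lengths, incrementing each category once per ID via list membership of 2 resp. 3 among the run lengths.
import Mathlib
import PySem

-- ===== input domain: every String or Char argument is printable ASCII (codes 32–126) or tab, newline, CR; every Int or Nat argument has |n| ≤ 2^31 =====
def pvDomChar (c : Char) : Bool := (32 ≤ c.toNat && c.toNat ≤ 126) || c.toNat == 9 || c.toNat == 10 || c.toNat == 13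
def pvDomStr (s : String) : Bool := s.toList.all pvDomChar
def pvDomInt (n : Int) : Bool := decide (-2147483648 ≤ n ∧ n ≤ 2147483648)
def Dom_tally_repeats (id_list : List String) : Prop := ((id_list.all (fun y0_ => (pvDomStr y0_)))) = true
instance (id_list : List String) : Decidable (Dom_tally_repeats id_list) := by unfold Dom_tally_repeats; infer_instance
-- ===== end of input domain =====

-- B replaces A's per-ID dict counting + flag-guarded value scan by sorting each ID's
-- non-space characters and collecting run lengths of equal characters (alternative
-- decomposition, similar cost).


-- ===== PORT A =====
-- state of the inner items-loop: (two_rep_count, three_rep_count, found_double, found_triple)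
def tallyStepA (acc : Int × Int) (cur_id : String) : Int × Int :=
  if cur_id = "" then acc
  else
    let id_chars : PySem.Dict Char Int :=
      cur_id.toList.foldl (fun d c =>
        if c = ' ' then d
        else if d.contains c then d.insert c (d.getD c 0 + 1)
        else d.insert c 1) PySem.Dict.empty
    let st := id_chars.items.foldl (fun (st : Int × Int × Bool × Bool) kv =>
      if kv.2 = 2 ∧ st.2.2.1 = false then (st.1 + 1, st.2.1, true, st.2.2.2)
      else if kv.2 = 3 ∧ st.2.2.2 = false then (st.1, st.2.1 + 1, st.2.2.1, true)
      else st) (acc.1, acc.2, false, false)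
    (st.1, st.2.1)

def tally_repeats (id_list : List String) : Int :=
  let r := id_list.foldl tallyStepA (0, 0)
  r.1 * r.2

-- ===== PORT B =====
-- _run_lengths: the while loop counting the equal-to-head prefix is takeWhile,
-- and chars[run:] drops that prefix and the head (exact for this slice).
def pvRunLengths : List Char → List Nat
  | [] => []
  | head :: rest =>
    let run := (rest.takeWhile (· == head)).length + 1
    run :: pvRunLengths (rest.dropWhile (· == head))
termination_by l => l.length
decreasing_by
  exact Nat.lt_succ_of_le (List.length_dropWhile_le _ _)

def tally_repeats_alt (id_list : List String) : Int :=
  let r := id_list.foldl (fun (acc : Int × Int) cur_id =>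
    let runs := pvRunLengths
      (PySem.List.sorted (cur_id.toList.filter (fun c => c != ' ')) (fun x => x) false)
    (acc.1 + (if 2 ∈ runs then 1 else 0), acc.2 + (if 3 ∈ runs then 1 else 0))) (0, 0)
  r.1 * r.2

-- ===== PRECONDITION & SPEC =====
def Spec_tally_repeats (id_list : List String) (out : Int) : Prop := out = tally_repeats_alt id_list
instance (id_list : List String) (out : Int) : Decidable (Spec_tally_repeats id_list out) := by unfold Spec_tally_repeats; infer_instance

-- ===== CLAIM (what is proved, stated in full; the proofs are below) =====
def Claim_equal_tally_repeats : Prop := ∀ (id_list : List String), Dom_tally_repeats id_list → Spec_tally_repeats id_list (tally_repeats id_list)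

-- ===== LEMMAS AND PROOFS =====

-- A's dict-building loop is the counter of the space-filtered character list.
lemma dict_loop_eq_counter (l : List Char) (d : PySem.Dict Char Int) :
    l.foldl (fun d c =>
        if c = ' ' then d
        else if d.contains c then d.insert c (d.getD c 0 + 1)
        else d.insert c 1) d
      = (l.filter (fun c => c != ' ')).foldl
          (fun d c => d.insert c (d.getD c 0 + 1)) d := by
  induction l generalizing d with
  | nil => rfl
  | cons c t ih =>
    by_cases hc : c = ' '
    · simp [hc, List.filter_cons, ih]
    · have hne : (c != ' ') = true := by simp [hc]
      by_cases hcon : d.contains c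
      · simp [hc, hcon, List.filter_cons, hne, ih]
      · have h0 : d.getD c 0 = 0 := by
          apply PySem.Dict.getD_of_not_contains
          simpa using hcon
        simp [hc, hcon, List.filter_cons, hne, ih, h0]

-- A's inner items-loop with flags, in closed form.
lemma items_loop_closed (ps : List (Char × Int)) (two three : Int) (fd ft : Bool) :
    ps.foldl (fun (st : Int × Int × Bool × Bool) kv =>
        if kv.2 = 2 ∧ st.2.2.1 = false then (st.1 + 1, st.2.1, true, st.2.2.2)
        else if kv.2 = 3 ∧ st.2.2.2 = false then (st.1, st.2.1 + 1, st.2.2.1, true)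
        else st) (two, three, fd, ft)
      = (two + (if fd = false ∧ ps.any (fun p => p.2 == 2) then 1 else 0),
         three + (if ft = false ∧ ps.any (fun p => p.2 == 3) then 1 else 0),
         fd || ps.any (fun p => p.2 == 2),
         ft || ps.any (fun p => p.2 == 3)) := by
  induction ps generalizing two three fd ft with
  | nil => simp
  | cons p t ih =>
    by_cases h2 : p.2 = 2
    · have b2 : (p.2 == 2) = true := by simp [h2]
      have h3 : ¬ p.2 = 3 := by omega
      have b3 : (p.2 == 3) = false := by simp [h3]
      cases fd <;> simp [h2, h3, b2, b3, ih, List.any_cons]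
    · have b2 : (p.2 == 2) = false := by simp [h2]
      by_cases h3 : p.2 = 3
      · have b3 : (p.2 == 3) = true := by simp [h3]
        cases ft <;> simp [h2, h3, b2, b3, ih, List.any_cons]
      · have b3 : (p.2 == 3) = false := by simp [h3]
        simp [h2, h3, b2, b3, ih, List.any_cons]

-- run lengths of a ≤-sorted list are exactly the character counts present.
lemma mem_runLengths_sorted (s : List Char) (hp : s.Pairwise (· ≤ ·)) (n : Nat) :
    n ∈ pvRunLengths s ↔ ∃ c ∈ s, s.count c = n := by
  induction s using pvRunLengths.induct with
  | case1 => simp [pvRunLengths]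
  | case2 head rest ih =>
    have hrest : rest = rest.takeWhile (· == head) ++ rest.dropWhile (· == head) :=
      (List.takeWhile_append_dropWhile).symm
    set t := rest.takeWhile (· == head) with ht
    set r := rest.dropWhile (· == head) with hr
    have htc : ∀ x ∈ t, x = head := by
      intro x hx
      simpa using List.mem_takeWhile_imp hx
    have hle : ∀ x ∈ rest, head ≤ x := by
      intro x hx; exact (List.pairwise_cons.mp hp).1 x hx
    have hpr : rest.Pairwise (· ≤ ·) := (List.pairwise_cons.mp hp).2
    have hprr : r.Pairwise (· ≤ ·) := by
      rw [hrest] at hpr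
      exact (List.pairwise_append.mp hpr).2.1
    have hrne : ∀ x ∈ r, x ≠ head := by
      intro x hx
      cases hhead : r with
      | nil => simp [hhead] at hx
      | cons y ys =>
        have hy : ¬ (y == head) = true := by
          have := List.head?_dropWhile_not (· == head) rest
          rw [← hr, hhead] at this
          simpa using this
        have hyh : y ≠ head := by simpa using hy
        have hhy : head ≤ y := hle y (by rw [hrest, hhead]; exact List.mem_append_right _ (by simp))
        have hylt : head < y := lt_of_le_of_ne hhy (Ne.symm hyh)
        rw [hhead] at hx
        rcases List.mem_cons.mp hx with rfl | hx'
        · exact ne_of_gt hylt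
        · have : y ≤ x := by
            rw [hhead] at hprr
            exact (List.pairwise_cons.mp hprr).1 x hx'
          exact ne_of_gt (lt_of_lt_of_le hylt this)
    have h1t : t.count head = t.length := by
      rw [List.count_eq_length]; intro x hx; rw [htc x hx]
    have h2r : r.count head = 0 := by
      rw [List.count_eq_zero]; intro hmem; exact hrne head hmem rfl
    have hcount_head : (head :: rest).count head = t.length + 1 := by
      rw [show (head :: rest) = head :: (t ++ r) by rw [← hrest]]
      simp [List.count_cons, List.count_append, h1t, h2r]
    have hcount_ne : ∀ c, c ≠ head → (head :: rest).count c = r.count c := by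
      intro c hcne
      have h1 : t.count c = 0 := by
        rw [List.count_eq_zero]; intro hmem; exact hcne (htc c hmem)
      rw [show (head :: rest) = head :: (t ++ r) by rw [← hrest]]
      simp [List.count_cons, List.count_append, h1, hcne, Ne.symm hcne]
    rw [show pvRunLengths (head :: rest) = ((rest.takeWhile (· == head)).length + 1) :: pvRunLengths (rest.dropWhile (· == head)) from by rw [pvRunLengths]]
    rw [← ht, ← hr]
    simp only [List.mem_cons]
    constructor
    · rintro (h | h)
      · exact ⟨head, by simp, by rw [hcount_head]; omega⟩
      · rcases (ih hprr).mp h with ⟨c, hcr, hcc⟩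
        have hcne : c ≠ head := hrne c hcr
        refine ⟨c, ?_, ?_⟩
        · right; rw [hrest]; exact List.mem_append_right _ hcr
        · rw [hcount_ne c hcne]; exact hcc
    · rintro ⟨c, hcs, hcc⟩
      by_cases hcne : c = head
      · left; subst hcne; rw [hcount_head] at hcc; omega
      · right
        refine (ih hprr).mpr ⟨c, ?_, ?_⟩
        · rcases hcs with rfl | hcr
          · exact absurd rfl hcne
          · rw [hrest] at hcr
            rcases List.mem_append.mp hcr with hin | hin
            · exact absurd (htc c hin) hcne
            · exact hin
        · rw [← hcount_ne c hcne]; exact hcc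

-- the common characterisation: per-ID step functions agree.
lemma step_eq (acc : Int × Int) (cur_id : String) :
    tallyStepA acc cur_id
      = (let runs := pvRunLengths
            (PySem.List.sorted (cur_id.toList.filter (fun c => c != ' ')) (fun x => x) false)
         (acc.1 + (if 2 ∈ runs then 1 else 0), acc.2 + (if 3 ∈ runs then 1 else 0))) := by
  by_cases hempty : cur_id = ""
  · subst hempty
    simp [tallyStepA, pvRunLengths, PySem.List.sorted]
  · have hperm : (PySem.List.sorted (cur_id.toList.filter (fun c => c != ' '))
        (fun x => x) false).Perm (cur_id.toList.filter (fun c => c != ' ')) :=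
      PySem.List.sorted_perm _ _ _
    have hpair := PySem.List.sorted_pairwise (cur_id.toList.filter (fun c => c != ' '))
      (fun x : Char => x)
    have hany : ∀ n : Nat,
        (((PySem.Dict.counter (cur_id.toList.filter (fun c => c != ' '))).items.any
            (fun p => p.2 == (n : Int))) = true
          ↔ n ∈ pvRunLengths (PySem.List.sorted (cur_id.toList.filter (fun c => c != ' '))
              (fun x => x) false)) := by
      intro n
      rw [mem_runLengths_sorted _ hpair n]
      simp only [PySem.Dict.items_counter, List.any_eq_true, List.mem_map, beq_iff_eq]
      constructor
      · rintro ⟨p, hp, hpe⟩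
        rcases hp with ⟨k, hk, rfl⟩
        have hkl : k ∈ cur_id.toList.filter (fun c => c != ' ') :=
          (PySem.Set.mem_ofList _ _).mp hk
        refine ⟨k, hperm.mem_iff.mpr hkl, ?_⟩
        rw [hperm.count_eq]
        have hpe' : ((List.count k (cur_id.toList.filter (fun c => c != ' ')) : Int))
            = (n : Int) := hpe
        exact_mod_cast hpe'
      · rintro ⟨c, hcs, hcc⟩
        have hcl : c ∈ cur_id.toList.filter (fun c => c != ' ') := hperm.mem_iff.mp hcs
        refine ⟨(c, ((cur_id.toList.filter (fun c => c != ' ')).count c : Int)),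
          ⟨c, (PySem.Set.mem_ofList _ _).mpr hcl, rfl⟩, ?_⟩
        rw [hperm.count_eq] at hcc
        show ((List.count c (cur_id.toList.filter (fun c => c != ' ')) : Int)) = (n : Int)
        exact_mod_cast hcc
    unfold tallyStepA
    simp only [if_neg hempty]
    rw [dict_loop_eq_counter, PySem.Dict.foldl_insert_getD_add_one_eq_counter,
        items_loop_closed]
    have e2 : ((PySem.Dict.counter (cur_id.toList.filter (fun c => c != ' '))).items.any
        (fun p => p.2 == (2 : Int)))
        = decide (2 ∈ pvRunLengths (PySem.List.sorted
            (cur_id.toList.filter (fun c => c != ' ')) (fun x => x) false)) := by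
      rw [Bool.eq_iff_iff, decide_eq_true_eq]; exact hany 2
    have e3 : ((PySem.Dict.counter (cur_id.toList.filter (fun c => c != ' '))).items.any
        (fun p => p.2 == (3 : Int)))
        = decide (3 ∈ pvRunLengths (PySem.List.sorted
            (cur_id.toList.filter (fun c => c != ' ')) (fun x => x) false)) := by
      rw [Bool.eq_iff_iff, decide_eq_true_eq]; exact hany 3
    simp [e2, e3]

-- ===== VERDICT (by name: the statement is the Claim_ definition above) =====
theorem tally_repeats_spec : Claim_equal_tally_repeats := by
  intro id_list _
  unfold Spec_tally_repeats tally_repeats tally_repeats_alt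
  rw [PySem.List.foldl_congr_mem id_list tallyStepA
    (fun (acc : Int × Int) cur_id =>
      let runs := pvRunLengths
        (PySem.List.sorted (cur_id.toList.filter (fun c => c != ' ')) (fun x => x) false)
      (acc.1 + (if 2 ∈ runs then 1 else 0), acc.2 + (if 3 ∈ runs then 1 else 0)))
    (0, 0) (fun acc x _ => step_eq acc x)]
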